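-- pv_equiv track=rewrite | github.com/rustleupchef/codewars | main.py | sixteen
-- ===== SOURCE A (Python) =====
-- def sixteen(watched: str) -> str:
--     watched = watched.split("\n")[0:-1]
--     dictionary = dict()
--
--     for watch in watched:
--         if watch in dictionary:
--             dictionary[watch] = dictionary[watch] + 1
--             continue
--         dictionary[watch] = 1
--
--     trending_key = max(dictionary, key=dictionary.get)
--     trending_value = dictionary[trending_key]
--     dictionary.pop(trending_key)
--     second_key = max(dictionary, key=dictionary.get)
--
--     return f"Trending: {trending_key} [{trending_value} count]\nSecond Place: {second_key} [{dictionary[second_key]} count]"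
-- ===== SOURCE B (Python) =====
-- def sixteen(watched: str) -> str:
--     counts = {}
--     for line in watched.split("\n")[:-1]:
--         counts[line] = counts.get(line, 0) + 1
--     top = second = None
--     for kv in counts.items():
--         if top is None or kv[1] > top[1]:
--             top, second = kv, top
--         elif second is None or kv[1] > second[1]:
--             second = kv
--     (k1, v1), (k2, v2) = top, second
--     return f"Trending: {k1} [{v1} count]\nSecond Place: {k2} [{v2} count]"
-- ===== Notes on version B (the rewrite author's own statement) =====
-- stated objective: alternative
-- what changed: B replaces A's max-over-keys / pop / second max-over-keys selection with a single streaming top-2 pass over the count dict's items (no mutation of the dict, one scan instead of two scans plus a pop).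
import Mathlib
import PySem

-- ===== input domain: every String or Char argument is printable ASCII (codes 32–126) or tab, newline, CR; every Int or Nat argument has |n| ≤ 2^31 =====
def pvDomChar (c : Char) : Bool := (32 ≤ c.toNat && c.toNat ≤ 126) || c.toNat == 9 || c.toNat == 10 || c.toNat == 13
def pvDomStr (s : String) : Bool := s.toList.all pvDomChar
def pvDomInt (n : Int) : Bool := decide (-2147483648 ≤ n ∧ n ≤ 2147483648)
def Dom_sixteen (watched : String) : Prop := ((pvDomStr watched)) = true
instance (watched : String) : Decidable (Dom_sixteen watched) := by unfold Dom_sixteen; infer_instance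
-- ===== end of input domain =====

-- B selects the top two counts in ONE streaming pass over the dict items instead of A's
-- max-over-keys / pop / max-over-keys; the RETURN values agree on inputs with at least two
-- distinct counted lines (A raises ValueError otherwise, and B a TypeError).

-- ===== PORT A =====
def sixteen (watched : String) : String :=
  match PySem.Str.split? watched "\n" with
  | none => ""  -- unreachable: the separator "\n" is nonempty
  | some parts =>
    let watched' := PySem.List.slice parts (some 0) (some (-1))
    let dictionary := watched'.foldl
      (fun d w => if d.contains w then d.insert w (d.getD w 0 + 1) else d.insert w 1)
      PySem.Dict.empty
    -- max(dictionary, key=dictionary.get): first key with maximal value (every key is present,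
    -- so dictionary.get k is the stored value; getD … 0 is exact here)
    match PySem.List.max? dictionary.keys (fun k => dictionary.getD k 0) with
    | none => ""  -- Python: ValueError from max() on an empty dict — excluded by Pre_
    | some trendingKey =>
      let trendingValue := dictionary.getD trendingKey 0
      let d2 := dictionary.erase trendingKey
      match PySem.List.max? d2.keys (fun k => d2.getD k 0) with
      | none => ""  -- Python: ValueError — excluded by Pre_
      | some secondKey =>
        "Trending: " ++ trendingKey ++ " [" ++ PySem.Int.toStr trendingValue ++
          " count]\nSecond Place: " ++ secondKey ++ " [" ++
          PySem.Int.toStr (d2.getD secondKey 0) ++ " count]"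

-- ===== PORT B =====
-- the body of B's for-loop over counts.items(): streaming top-2, first-wins on ties
def sixteenAltStep (st : Option (String × Int) × Option (String × Int))
    (kv : String × Int) : Option (String × Int) × Option (String × Int) :=
  match st.1 with
  | none => (some kv, st.1)
  | some t =>
    if t.2 < kv.2 then (some kv, st.1)
    else
      match st.2 with
      | none => (st.1, some kv)
      | some s => if s.2 < kv.2 then (st.1, some kv) else st

def sixteen_alt (watched : String) : String :=
  match PySem.Str.split? watched "\n" with
  | none => ""  -- unreachable: the separator "\n" is nonempty
  | some parts =>
    let lines := PySem.List.slice parts none (some (-1))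
    let counts := lines.foldl (fun d w => d.insert w (d.getD w 0 + 1)) PySem.Dict.empty
    match counts.items.foldl sixteenAltStep (none, none) with
    | (some (k1, v1), some (k2, v2)) =>
        "Trending: " ++ k1 ++ " [" ++ PySem.Int.toStr v1 ++
          " count]\nSecond Place: " ++ k2 ++ " [" ++ PySem.Int.toStr v2 ++ " count]"
    | _ => ""  -- Python: TypeError unpacking None — excluded by Pre_

-- ===== PRECONDITION & SPEC =====
-- Pre_ excludes exactly the inputs with fewer than two distinct lines in watched.split("\n")[:-1],
-- on which A raises ValueError (and B raises TypeError).
def Pre_sixteen (watched : String) : Prop :=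
  2 ≤ (PySem.Set.ofList (((PySem.Str.split? watched "\n").getD []).dropLast)).length
instance (watched : String) : Decidable (Pre_sixteen watched) := by
  unfold Pre_sixteen; infer_instance

def pvWitness_sixteen : String := "a\nb\na\n"

def Spec_sixteen (watched : String) (out : String) : Prop := out = sixteen_alt watched
instance (watched : String) (out : String) : Decidable (Spec_sixteen watched out) := by
  unfold Spec_sixteen; infer_instance

-- ===== CLAIM (what is proved, stated in full; the proofs are below) =====
def Claim_equal_sixteen : Prop :=
  ∀ (watched : String), Dom_sixteen watched → Pre_sixteen watched →
    Spec_sixteen watched (sixteen watched)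

-- ===== LEMMAS AND PROOFS =====

-- max? of one more element at the right end
lemma max?_append_singleton {α κ : Type} [LT κ] [DecidableLT κ] (l : List α) (x : α)
    (key : α → κ) :
    PySem.List.max? (l ++ [x]) key
      = match PySem.List.max? l key with
        | none => some x
        | some m => if key m < key x then some x else some m := by
  unfold PySem.List.max?
  rw [List.foldl_append]
  rfl

-- max? over a mapped list is the mapped max? under the composed key
lemma max?_map_fst {α β κ : Type} [LinearOrder κ] (l : List α) (f : α → β) (key : β → κ) :
    PySem.List.max? (l.map f) key = Option.map f (PySem.List.max? l (fun a => key (f a))) := by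
  induction l using List.reverseRecOn with
  | nil => rfl
  | append_singleton l x ih =>
    rw [List.map_append, List.map_singleton, max?_append_singleton, max?_append_singleton, ih]
    rcases PySem.List.max? l (fun a => key (f a)) with _ | m
    · rfl
    · by_cases h : key (f m) < key (f x) <;> simp [h]

-- max? is determined by the key values on the list's members
lemma max?_congr_mem {α κ : Type} [LT κ] [DecidableLT κ] (l : List α) (k1 k2 : α → κ)
    (h : ∀ x ∈ l, k1 x = k2 x) :
    PySem.List.max? l k1 = PySem.List.max? l k2 := by
  induction l using List.reverseRecOn with
  | nil => rfl
  | append_singleton l x ih =>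
    rw [max?_append_singleton, max?_append_singleton,
        ih (fun y hy => h y (List.mem_append_left _ hy)), h x (by simp)]
    rcases hm : PySem.List.max? l k2 with _ | m
    · rfl
    · simp [h m (List.mem_append_left _ (PySem.List.max?_mem hm))]

-- the two counting loops build the same dict (when the key is absent, getD w 0 + 1 = 1)
lemma dict_eq (lines : List String) :
    lines.foldl
      (fun d w => if d.contains w then d.insert w (d.getD w 0 + 1) else d.insert w 1)
      (PySem.Dict.empty : PySem.Dict String Int)
      = lines.foldl (fun d w => d.insert w (d.getD w 0 + 1)) PySem.Dict.empty := by
  apply List.foldl_ext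
  intro d w _
  by_cases h : d.contains w = true
  · simp [h]
  · simp only [Bool.not_eq_true] at h
    simp [h, PySem.Dict.getD_of_not_contains d (0 : Int) h]

-- core: the streaming top-2 fold computes (first max, first max after removing its key)
lemma top2_spec (l : List (String × Int)) (hnd : (l.map Prod.fst).Nodup) :
    l.foldl sixteenAltStep (none, none)
      = (PySem.List.max? l (fun p => p.2),
         match PySem.List.max? l (fun p => p.2) with
         | none => none
         | some p => PySem.List.max? (l.filter (fun q => !(q.1 == p.1))) (fun p => p.2)) := by
  induction l using List.reverseRecOn with
  | nil => rfl
  | append_singleton l x ih =>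
    rw [List.map_append, List.map_singleton, List.nodup_append] at hnd
    obtain ⟨hndl, -, hdisj⟩ := hnd
    have hx : x.1 ∉ l.map Prod.fst := fun hmem =>
      hdisj x.1 hmem x.1 (by simp) rfl
    rw [List.foldl_append, List.foldl_cons, List.foldl_nil, ih hndl,
        max?_append_singleton]
    rcases hm : PySem.List.max? l (fun p => p.2) with _ | p
    · have hl : l = [] := (PySem.List.max?_eq_none_iff _ _).mp hm
      subst hl
      simp [sixteenAltStep, PySem.List.max?]
    · have hpmem : p ∈ l := PySem.List.max?_mem hm
      have hp1 : p.1 ∈ l.map Prod.fst := List.mem_map_of_mem hpmem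
      have hxp : p.1 ≠ x.1 := fun h => hx (h ▸ hp1)
      by_cases hlt : p.2 < x.2
      · have hfil : (l ++ [x]).filter (fun q => !(q.1 == x.1)) = l := by
          rw [List.filter_append]
          have h1 : [x].filter (fun q => !(q.1 == x.1)) = [] := by simp
          have h2 : l.filter (fun q => !(q.1 == x.1)) = l :=
            List.filter_eq_self.mpr (fun q hq => by
              have : q.1 ≠ x.1 := fun h => hx (h ▸ List.mem_map_of_mem hq)
              simp [this])
          rw [h1, h2, List.append_nil]
        simp only [hlt, if_true, hfil, hm]
        simp [sixteenAltStep, hlt]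
      · have hfil : (l ++ [x]).filter (fun q => !(q.1 == p.1))
            = l.filter (fun q => !(q.1 == p.1)) ++ [x] := by
          rw [List.filter_append]
          congr 1
          simp [Ne.symm hxp]
        simp only [hlt, if_false, hfil, max?_append_singleton]
        rcases hs : PySem.List.max? (l.filter (fun q => !(q.1 == p.1))) (fun p => p.2)
          with _ | s
        · simp [sixteenAltStep, hlt, hs]
        · by_cases hlt2 : s.2 < x.2 <;> simp [sixteenAltStep, hlt, hlt2, hs]

-- a Nodup list of length ≥ 2 has a member different from any given element
lemma exists_ne_of_nodup {α : Type} (l : List α) (hnd : l.Nodup) (hlen : 2 ≤ l.length)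
    (a : α) : ∃ x ∈ l, x ≠ a := by
  match l, hlen with
  | x :: y :: t, _ =>
    have hxy : x ≠ y := by simp [List.nodup_cons] at hnd; tauto
    by_cases hxa : x = a
    · exact ⟨y, by simp, fun h => hxy (hxa.trans h.symm ▸ rfl)⟩
    · exact ⟨x, by simp, hxa⟩

-- ===== VERDICT (by name: the statement is the Claim_ definition above) =====
theorem sixteen_spec : Claim_equal_sixteen := by
  intro watched _ hpre
  unfold Spec_sixteen sixteen sixteen_alt
  unfold Pre_sixteen at hpre
  rcases hsp : PySem.Str.split? watched "\n" with _ | parts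
  · simp [PySem.Str.split?, PySem.Chars.split?] at hsp
  rw [hsp] at hpre
  simp only [Option.getD_some] at hpre
  simp only [PySem.List.slice_zero_start, PySem.List.slice_to_neg_one]
  set lines := parts.dropLast with hlines
  rw [dict_eq lines, PySem.Dict.foldl_insert_getD_add_one_eq_counter]
  set d := PySem.Dict.counter lines with hd
  have hnodup : d.keys.Nodup := PySem.Dict.nodup_keys_counter lines
  have hkeys : d.keys = PySem.Set.ofList lines := PySem.Dict.keys_counter lines
  have hkeys_items : d.keys = d.items.map Prod.fst := rfl
  have hnditems : (d.items.map Prod.fst).Nodup := hkeys_items ▸ hnodup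
  -- A's first max over keys = fst of the first max over items by value
  have hA1 : PySem.List.max? d.keys (fun k => d.getD k 0)
      = Option.map Prod.fst (PySem.List.max? d.items (fun p => p.2)) := by
    rw [hkeys_items, max?_map_fst]
    congr 1
    exact max?_congr_mem _ _ _ (fun p hp =>
      PySem.Dict.getD_of_mem_items d hp hnodup 0)
  -- items are nonempty (≥ 2 distinct lines)
  have hlen : 2 ≤ d.items.length := by
    have : d.items.length = d.keys.length := by
      rw [hkeys_items, List.length_map]
    rw [this, hkeys]; exact hpre
  rcases hm : PySem.List.max? d.items (fun p => p.2) with _ | p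
  · rw [(PySem.List.max?_eq_none_iff _ _).mp hm] at hlen; simp at hlen
  have hpmem : p ∈ d.items := PySem.List.max?_mem hm
  have hv1 : d.getD p.1 0 = p.2 := PySem.Dict.getD_of_mem_items d hpmem hnodup 0
  -- the erased dict
  have hd2items : (d.erase p.1).items = d.items.filter (fun q => !(q.1 == p.1)) := rfl
  have hnd2 : (d.erase p.1).keys.Nodup := by
    have : (d.erase p.1).keys = ((d.items.filter (fun q => !(q.1 == p.1))).map Prod.fst) := rfl
    rw [this]
    exact hnditems.sublist (List.Sublist.map Prod.fst List.filter_sublist)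
  have hA2 : PySem.List.max? (d.erase p.1).keys (fun k => (d.erase p.1).getD k 0)
      = Option.map Prod.fst
          (PySem.List.max? (d.items.filter (fun q => !(q.1 == p.1))) (fun q => q.2)) := by
    have hk2 : (d.erase p.1).keys = (d.erase p.1).items.map Prod.fst := rfl
    rw [hk2, hd2items, max?_map_fst]
    congr 1
    exact max?_congr_mem _ _ _ (fun q hq =>
      PySem.Dict.getD_of_mem_items (d.erase p.1) (hd2items ▸ hq) hnd2 0)
  -- the filtered items are nonempty: some key differs from p.1
  obtain ⟨k', hk'mem, hk'ne⟩ :=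
    exists_ne_of_nodup d.keys hnodup (by rw [hkeys]; exact hpre) p.1
  obtain ⟨q0, hq0mem, hq0⟩ := List.mem_map.mp (hkeys_items ▸ hk'mem)
  have hq0fil : q0 ∈ d.items.filter (fun q => !(q.1 == p.1)) :=
    List.mem_filter.mpr ⟨hq0mem, by simp [hq0, hk'ne]⟩
  rcases hm2 : PySem.List.max? (d.items.filter (fun q => !(q.1 == p.1))) (fun q => q.2)
    with _ | q
  · rw [(PySem.List.max?_eq_none_iff _ _).mp hm2] at hq0fil; simp at hq0fil
  have hqmem : q ∈ (d.erase p.1).items := hd2items ▸ PySem.List.max?_mem hm2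
  have hv2 : (d.erase p.1).getD q.1 0 = q.2 :=
    PySem.Dict.getD_of_mem_items (d.erase p.1) hqmem hnd2 0
  -- B's fold
  have hB : d.items.foldl sixteenAltStep (none, none) = (some p, some q) := by
    rw [top2_spec d.items hnditems, hm]
    simp [hm2]
  -- assemble
  simp only [hA1, hm, Option.map_some, hA2, hm2, hB, hv1, hv2]
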